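/- GENERATED by tools/from_farm_form.py from prooffarm-gif/accepted/DGifDecompressLine.9/Lemmas.lean (a worked proof of the farm's unit `DGifDecompressLine.9`,
   accepted by the verdict) — do not edit. -/
import Gif.Spec.Units.DGifDecompressLine_9
import Gif.Spec.AllSegs

/-!
  Lemmas for the unit `DGifDecompressLine.9` (segment 9 of the LZW decoder, l.940-944: the arm that accepts an undefined code):
  the segment is walked in TWO STEPS that meet at the return address 0x106d56 (`ret18`) of the call of `DGifGetPrefixChar`. The
  assertion there is `Mid` itself at the label `ret18` (every register that `Mid` mentions is callee-saved; `eax` is any value).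

      seg9_call        0x106d47 … the call of DGifGetPrefixChar … 0x106d56: `Mid at_106d47` → `Mid ret18`
      seg9_tail        0x106d56 … 0x106da2 → 0x106e4b: `Mid ret18` → `Trace at_106e4b` with `k = 4094`
-/

open X86 X86.User Asan ProgX.Base ProgX.Base.Spec Gif.Spec

set_option maxRecDepth 4000
set_option maxHeartbeats 4000000

namespace Gif.Spec.DGifDecompressLine_9

/-- **106D47H … the call of DGifGetPrefixChar … 106D56H (ret18)** (dgif_lib.c:942 `DGifGetPrefixChar(Prefix, CrntCode, ClearCode)`):
`edx = ClearCode` from its slot (not negative by [LZ2]), `esi = r12d` (any value), `rdi = r13 = Prefix`. The callee stores nothing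
but its own stack: `Mid` again at the return address. -/
theorem seg9_call (Lay : Layout) (hLay : Lay.hi = 0x1000000) (μ : Microarch) (hμ : UserX.MicroOK μ) (u₀ : State)
    (hcode : HasCodeNat Lay u₀ Gif.L.DGifDecompressLine.entry Gif.Code.code_DGifDecompressLine.nat Gif.L.DGifDecompressLine.size)
    (H : Heap) (rest : List Obj) (frames : List (Nat × FrameLayout)) (F : Forest) (R : Rd) (n m : Nat) (e : State) (ret : Word)
    (h_gpc : Calls Lay μ ProgX.Base.WayInv (ProgX.Base.conv u₀) Gif.L.DGifGetPrefixChar.entry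
      (Gif.Spec.DGifGetPrefixChar.spec H rest (DGifDecompressLine.framesIn frames e) F.pv))
    (v : State) (hat : DGifDecompressLine.Mid Gif.L.DGifDecompressLine.at_106d47 m H rest frames F R n u₀ e ret v) :
    ReachVia Lay μ ProgX.Base.WayInv v (DGifDecompressLine.Mid Gif.L.DGifDecompressLine.ret18 m H rest frames F R n u₀ e ret) := by
  obtain ⟨⟨hbody, hloc, h_r14, h_r13, h_rbx, h_rbp, h_w1⟩, h_lt, h_sp0, h_mu⟩ := hat
  -- 1. THE PRELUDE (the same in every segment of this function; Gif/Spec/LzwCarry.lean §2)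
  have he := hbody.entry
  v_entry he
  have hgin := hbody.gif_inside
  have hpin := hbody.pv_inside
  have hn31 : n < 2 ^ 31 := hbody.len_lt
  have henv : Env H rest frames F R e := hbody.pre.1
  have w_rip := hbody.rip
  have c_rsp : v.reg .rsp = e.reg .rsp - 200 := hbody.rsp
  have w_eq : Mem.EqOn ProgX.Base.L.textLo ProgX.Base.L.textHi u₀.mem v.mem := ProgX.Base.conv_code_eqOn hbody.code
  have hdf : v.flags .df = false := (show abiInv _ from hbody.abi).1
  have hmx : v.mxcsr &&& 0x1F80 = 0x1F80 := (show abiInv _ from hbody.abi).2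
  have hsse := ProgX.Base.sseOK_of_abiInv hbody.abi
  have w_kept : RegsKept [.rsp] v v := RegsKept.refl _ _
  -- 2. THE SLOT THE SEGMENT READS: `ClearCode` ≤ 256 [LZ2]
  have hclear := hbody.lz.clear
  have k_clear : v.mem.readLE (e.reg .rsp - 184) 4 = GifFilePrivateType.ClearCode v.mem F.pv := hloc.s_clear
  -- 3. THE WALK, to the call's return address
  u_walk hcode [hμ.vendor] until [Gif.L.DGifDecompressLine.ret18]
    span [ProgX.Base.L.textLo, ProgX.Base.L.textHi] side (v_side)
  case call_inv =>
    v_inv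
  case pre_106d51 =>
    -- DGifGetPrefixChar'S PRECONDITION. The heap's invariant for the frame list with the own frame in front: only the return
    -- address was pushed since `v`
    have hs : Mem.SameExcept [⟨(e.reg .rsp).toNat - 560, (e.reg .rsp).toNat - 200⟩] v.mem s_106d51.mem := by
      rw [w_mem]
      u_same
    have henv' : Env H rest (DGifDecompressLine.framesIn frames e) F R s_106d51 := by
      refine henv.at_call hbody.inv hbody.ok hs (by omega) (by omega) ?_ ?_ ?_
      · rw [w_rsp]
        u_omega
      · rw [w_rsp]
        u_omega
      · rw [w_rsp]
        u_omega
    -- the four clauses: `HeapPre`, pv live, `rdi = Prefix`, `edx = ClearCode` not negative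
    refine ⟨henv'.heap, hbody.ok.pv_live, ?_, ?_⟩
    · rw [w_rdi]
      exact h_r13
    · rw [w_rdx, Gif.Spec.toNat_ofBV_ofNat32 _ (by omega)]
      omega
  -- 0x106d56 (ret18): DGifGetPrefixChar HAS RETURNED. Its post: no shadow byte written
  have hun1 : ShadowUntouched s_106d51.mem s_106d51r.mem := w_post
  -- the callee's footprint in terms of `v` (`w_same : SameExcept […] v.mem… s_106d51r.mem`)
  v_after_call w_rsp_106d51 w_mem_106d51
  -- what was stored since `v`: the return address, the callee's frame
  have hsame : Mem.SameExcept [⟨(e.reg .rsp).toNat - 560, (e.reg .rsp).toNat - 200⟩] v.mem s_106d51r.mem := by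
    u_same
  have hun : ShadowUntouched v.mem s_106d51r.mem := by
    v_untouched
  -- `Body`, `Locals` and the measure through the call: every window written is a scratch window
  obtain ⟨k_body, k_loc, k_mu, k_clr, k_eof⟩ :=
    hbody.carry (cut' := Gif.L.DGifDecompressLine.ret18) w_rip w_rsp (ProgX.Base.conv_code_eqOn w_code) w_inv hun hsame
      (by dl_scratch)
  -- `Mid` at `ret18`: `Main` (the four registers are callee-saved), `i < LineLen`, `StackPtr = 0`, the measure
  refine ReachVia.done ⟨⟨k_body, k_loc hloc, ?_, ?_, ?_, ?_, ?_⟩, ?_, ?_, ?_⟩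
  · rw [w_kept .r14 rfl]
    exact h_r14
  · rw [w_kept .r13 rfl]
    exact h_r13
  · rw [w_kept .rbx rfl]
    exact h_rbx
  · rw [w_kept .rbp rfl]
    exact h_rbp
  · rw [w_kept .rbp rfl, w_kept .rbx rfl]
    exact h_w1
  · rw [w_kept .rbp rfl]
    exact h_lt
  · rw [w_kept .rbx rfl]
    exact h_sp0
  · rw [k_mu]
    exact h_mu

/-- **106D56H (ret18) … 106DA2H → 106E4BH** (dgif_lib.c:941-944): the result's low byte to `Stack[0]` (`StackPtr = 0`) and to
`Suffix[RunningCode − 2]` (`2 ≤ RunningCode ≤ 4097` by [LZ3]), two checked stores; `StackPtr = 1`, `CrntPrefix = LastCode`, `i` and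
`Private` spilled, `r15d = ClearCode`: the head of the trace loop with `k = 4094`. -/
theorem seg9_tail (Lay : Layout) (hLay : Lay.hi = 0x1000000) (μ : Microarch) (hμ : UserX.MicroOK μ) (u₀ : State)
    (hcode : HasCodeNat Lay u₀ Gif.L.DGifDecompressLine.entry Gif.Code.code_DGifDecompressLine.nat Gif.L.DGifDecompressLine.size)
    (H : Heap) (rest : List Obj) (frames : List (Nat × FrameLayout)) (F : Forest) (R : Rd) (n m : Nat) (e : State) (ret : Word)
    (h_store1 : Asan.SmallCheck Lay μ ProgX.Base.WayInv (ProgX.Base.CodeOK u₀) [.rax, .rdx] 1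
      ProgX.Base.L.__asan_store1_noabort.entry)
    (v : State) (hat : DGifDecompressLine.Mid Gif.L.DGifDecompressLine.ret18 m H rest frames F R n u₀ e ret v) :
    ReachVia Lay μ ProgX.Base.WayInv v
      (fun w => ∃ k, DGifDecompressLine.Trace Gif.L.DGifDecompressLine.at_106e4b m k H rest frames F R n u₀ e ret w) := by
  obtain ⟨⟨hbody, hloc, h_r14, h_r13, h_rbx, h_rbp, h_w1⟩, h_lt, h_sp0, h_mu⟩ := hat
  -- 1. THE PRELUDE (the same in every segment of this function; Gif/Spec/LzwCarry.lean §2)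
  have he := hbody.entry
  v_entry he
  have hgin := hbody.gif_inside
  have hpin := hbody.pv_inside
  have hn31 : n < 2 ^ 31 := hbody.len_lt
  have w_rip := hbody.rip
  have c_rsp : v.reg .rsp = e.reg .rsp - 200 := hbody.rsp
  have w_eq : Mem.EqOn ProgX.Base.L.textLo ProgX.Base.L.textHi u₀.mem v.mem := ProgX.Base.conv_code_eqOn hbody.code
  have hdf : v.flags .df = false := (show abiInv _ from hbody.abi).1
  have hmx : v.mxcsr &&& 0x1F80 = 0x1F80 := (show abiInv _ from hbody.abi).2
  have hsse := ProgX.Base.sseOK_of_abiInv hbody.abi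
  have w_kept : RegsKept [.rsp] v v := RegsKept.refl _ _
  -- 2. THE REGISTERS AND SLOTS THE SEGMENT READS
  -- `ebx` = StackPtr = 0: `movsxd rbx, ebx` is the register itself (a fact for the walker)
  have hsp31 : (v.reg .rbx).toNat < 2 ^ 31 := by omega
  have hclear := hbody.lz.clear
  have hrc_lo := hbody.lz.code_lo
  have hrc_hi := hbody.lz.code_hi
  have k_stack : v.mem.readLE (e.reg .rsp - 192) 8 = F.pv + 344 := hloc.s_stack
  have k_suffix : v.mem.readLE (e.reg .rsp - 176) 8 = F.pv + 4439 := hloc.s_suffix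
  have k_clear : v.mem.readLE (e.reg .rsp - 184) 4 = GifFilePrivateType.ClearCode v.mem F.pv := hloc.s_clear
  -- `Private->RunningCode` (`movsxd rax, [r14+14H]`) as a number `rc`, `2 ≤ rc ≤ 4097` [LZ3]: its sign extension is the number
  obtain ⟨rc, l_rc⟩ : ∃ rc, v.mem.readLE (v.reg .r14 + 20) 4 = rc := ⟨_, rfl⟩
  have e_rc : rc = GifFilePrivateType.RunningCode v.mem F.pv := by
    rw [← l_rc, rd_eq_readLE v.mem _ (F.pv + 20) 4 (by u_omega)]
    simp only [gfield]
  rw [← e_rc] at hrc_lo hrc_hi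
  have hrc_bv : (BitVec.ofNat 32 rc).toNat = rc := Gif.Spec.toNat_ofNat32 rc (by omega)
  have hsx : Word.ofBV (BitVec.signExtend 64 (BitVec.ofNat 32 rc)) = UInt64.ofNat rc := by
    rw [Gif.Spec.sext32_bv _ (by omega), hrc_bv]
  -- 3. THE WALK, to the head of the trace loop
  u_walk hcode [hμ.vendor, Gif.Spec.sext32_small (v.reg .rbx) hsp31, hsx]
    until [Gif.L.DGifDecompressLine.at_106e4b]
    span [ProgX.Base.L.textLo, ProgX.Base.L.textHi] side (v_side)
  -- 4. THE CHECK GOALS: the table is live (`stackLive`, `suffixLive`: the index against THE ARRAY'S OWN count)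
  case check_106d6b =>
    -- l.941 `Stack[StackPtr++] =`: `StackPtr = 0`, inside `Stack[4095]`
    have hun : ShadowUntouched v.mem s_106d6b.mem := by v_untouched
    have hl := stackLive hbody.ok.pv_live rest (DGifDecompressLine.framesIn frames e) (v.reg .rbx).toNat (by omega)
    simp only [gfield] at hl
    exact hl.accSmall hbody.inv.shadow hun _ 1 (by decide) (by u_omega) (by u_omega)
  case check_106d84 =>
    -- l.940 `Suffix[Private->RunningCode - 2] =`: `2 ≤ RunningCode ≤ 4097` [LZ3], inside `Suffix[4096]`
    have hun : ShadowUntouched v.mem s_106d84.mem := by v_untouched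
    have hl := suffixLive hbody.ok.pv_live rest (DGifDecompressLine.framesIn frames e) (rc - 2) (by omega)
    simp only [gfield] at hl
    exact hl.accSmall hbody.inv.shadow hun _ 1 (by decide) (by u_omega) (by u_omega)
  -- 5. THE EXIT 0x106e4b (l.955): the head of the trace loop. `Body` through the segment's stores by `Body.carry`
  -- the values the two spills stored, as numbers
  have e_i : (Word.part .w32 (v.reg .rbp)).toNat = (v.reg .rbp).toNat := by
    rw [ProgX.toNat_part32]
    exact Nat.mod_eq_of_lt (by omega)
  rw [e_i, h_r14] at w_mem
  -- what was stored: the return addresses of the two checks, `Stack[0]`, `Suffix[RunningCode − 2]`, the two spill slots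
  have hun : ShadowUntouched v.mem s_106da2.mem := by v_untouched
  have hsame : Mem.SameExcept [⟨(e.reg .rsp).toNat - 208, (e.reg .rsp).toNat - 200⟩,
      ⟨(e.reg .rsp).toNat - 144, (e.reg .rsp).toNat - 128⟩, ⟨F.pv + 344, F.pv + 4439⟩, ⟨F.pv + 4439, F.pv + 8535⟩]
      v.mem s_106da2.mem := by
    rw [w_mem]
    u_same
  have habi : (conv u₀).inv s_106da2 := by v_inv
  obtain ⟨k_body, k_loc, k_mu, k_clr, k_eof⟩ :=
    hbody.carry (cut' := Gif.L.DGifDecompressLine.at_106e4b) w_rip w_rsp w_eq habi hun hsame (by dl_scratch)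
  -- `Trace` with `k = 4094`: `Body`, `Locals`, then `r13`, `r15`, `rbx`, the two spill slots, the measure
  refine ReachVia.done ⟨4094, k_body, k_loc hloc, ?_, ?_, ?_, ?_, ?_, ?_⟩
  · rw [w_kept .r13 rfl]
    exact h_r13
  · -- `r15d = ClearCode`: the field was not stored to
    rw [w_r15, Gif.Spec.toNat_ofBV_ofNat32 _ (by omega), k_clr]
  · -- StackPtr = 0 + 1, and 1 + 4094 = 4095
    rw [w_rbx, Gif.Spec.lea32_succ _ (by omega)]
    omega
  · -- `i` spilled to [rsp+38H], `i < LineLen`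
    have k_i : s_106da2.mem.readLE (e.reg .rsp - 144) 4 = (v.reg .rbp).toNat := by u_read
    rw [k_i]
    exact h_lt
  · -- `Private` spilled to [rsp+40H]
    u_read
  · -- the measure: no store of the segment touched it
    rw [k_mu]
    exact h_mu

end Gif.Spec.DGifDecompressLine_9
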